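-- pv_equiv track=rewrite | github.com/V0XNIHILI/TCN-library | src/tcn_lib/stats.py | get_kernel_size_and_layers
-- ===== SOURCE A (Python) =====
-- from typing import List, Union, Tuple
--
-- def get_receptive_field_size(kernel_size: Union[int, List[int]],
--                              num_layers: int,
--                              dilation_exponential_base: int = 2):
--     """Calculate the receptive field size of a TCN. We assume the TCN structure of the paper
--     from Bai et al.
--
--     Due to: https://github.com/locuslab/TCN/issues/44#issuecomment-677949937
--
--     Args:
--         kernel_size (Union[int, List[int]]): Size of the kernel(s).
--         num_layers (int): Number of layers in the TCN.
--         dilation_exponential_base (int, optional): Dilation exponential size. Defaults to 2.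
--
--     Returns:
--         int: Receptive field size.
--     """
--
--     if isinstance(kernel_size, int):
--         kernel_size = [kernel_size] * num_layers
--
--     return sum([
--         2 * dilation_exponential_base**(l - 1) * (kernel_size[l-1] - 1)
--         for l in range(1,num_layers+1)
--     ]) + 1
--
-- def get_kernel_size_and_layers(required_receptive_field_size: int, kernel_sizes: List[int] = [3,5,7,9], dilation_exponential_base: int = 2):
--     """Get the configuration of kernel size and number of layers that has a receptive field size closest
--     (but always larger) than the required receptive field size.
--
--     Args:
--         required_receptive_field_size (int): Required receptive field size.
--         kernel_sizes (List[int], optional): List of kernel sizes to choose from. Defaults to [3,5,7,9].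
--         dilation_exponential_base (int, optional): Dilation exponential size. Defaults to 2.
--
--     Returns:
--         Tuple[int, int]: Tuple of kernel size and number of layers.
--     """
--
--     configurations = []
--
--     # Find for each kernel size the number of layers that has a receptive field size closest to the required receptive field size
--     for kernel_size in kernel_sizes:
--         num_layers = 1
--
--         while get_receptive_field_size(kernel_size, num_layers, dilation_exponential_base) < required_receptive_field_size:
--             num_layers += 1
--
--         configurations.append((kernel_size, num_layers))
--
--     # Find the configuration with the smallest receptive field size that is larger than the required receptive field size
--     min_receptive_field_size = float('inf')
--     configuration = None
--
--     for kernel_size, num_layers in configurations: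
--         receptive_field_size = get_receptive_field_size(kernel_size, num_layers, dilation_exponential_base)
--
--         if receptive_field_size < min_receptive_field_size:
--             min_receptive_field_size = receptive_field_size
--
--             configuration = (kernel_size, num_layers)
--
--     return configuration
-- ===== SOURCE B (Python) =====
-- from typing import List, Tuple
--
--
-- def get_kernel_size_and_layers(required_receptive_field_size: int, kernel_sizes: List[int] = [3,5,7,9], dilation_exponential_base: int = 2):
--     """Single pass: for each kernel size grow the receptive field incrementally
--     (adding one dilated layer at a time, maintaining the running dilation power)
--     instead of recomputing the whole geometric sum for every candidate depth,
--     and keep a running best instead of a second pass over a configurations list."""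
--     best = None  # (receptive_field_size, (kernel_size, num_layers))
--
--     for kernel_size in kernel_sizes:
--         step = 2 * (kernel_size - 1)
--         receptive_field_size = 1 + step  # one layer: 1 + 2 * base**0 * (k - 1)
--         power = dilation_exponential_base
--         num_layers = 1
--
--         while receptive_field_size < required_receptive_field_size:
--             receptive_field_size += step * power
--             power *= dilation_exponential_base
--             num_layers += 1
--
--         if best is None or receptive_field_size < best[0]:
--             best = (receptive_field_size, (kernel_size, num_layers))
--
--     return best[1] if best is not None else None
-- ===== Notes on version B (the rewrite author's own statement) =====
-- stated objective: alternative
-- what changed: B makes one pass that grows each kernel's receptive field incrementally (keeping the running dilation power and a running best configuration), instead of A's recomputation of the whole geometric sum from scratch at every trial depth followed by a second pass over a configurations list; the inner rescan of A disappears, but a timing run could not compare the two (A clocked out).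
import Mathlib
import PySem

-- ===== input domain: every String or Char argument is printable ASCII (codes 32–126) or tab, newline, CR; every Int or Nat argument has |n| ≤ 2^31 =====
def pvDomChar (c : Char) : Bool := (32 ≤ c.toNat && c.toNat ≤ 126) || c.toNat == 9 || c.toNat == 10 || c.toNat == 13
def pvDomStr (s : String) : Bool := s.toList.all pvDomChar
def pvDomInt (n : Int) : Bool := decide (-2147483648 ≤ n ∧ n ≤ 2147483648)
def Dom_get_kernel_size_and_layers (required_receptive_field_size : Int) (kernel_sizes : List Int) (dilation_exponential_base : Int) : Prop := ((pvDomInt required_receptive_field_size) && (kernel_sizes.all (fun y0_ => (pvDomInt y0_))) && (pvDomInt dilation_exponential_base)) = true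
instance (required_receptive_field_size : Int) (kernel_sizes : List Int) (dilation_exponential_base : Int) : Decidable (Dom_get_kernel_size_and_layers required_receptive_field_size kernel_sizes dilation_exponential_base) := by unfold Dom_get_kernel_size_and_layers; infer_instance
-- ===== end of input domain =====

-- B replaces A's per-depth recomputation of the geometric receptive-field sum (plus a second
-- selection pass over a configurations list) by a single incremental pass with a running best.

-- ===== PORT A =====
-- A's helper on the int branch: kernel_size becomes the list [k]*num_layers, then the
-- comprehension sums 2*base^(l-1)*(ks[l-1]-1) for l in range(1, num_layers+1).
-- ks[l-1] is ported with pyGetD 0: exact here because 0 ≤ l-1 < num_layers for every l of the range.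
def get_receptive_field_size (kernel_size : Int) (num_layers : Int) (dilation_exponential_base : Int) : Int :=
  let ks := List.replicate num_layers.toNat kernel_size
  (PySem.List.pyRange 1 (num_layers + 1) 1).foldl
    (fun acc l => acc + 2 * dilation_exponential_base ^ (l - 1).toNat * (PySem.List.pyGetD ks (l - 1) 0 - 1)) 0
    + 1

-- A's inner 'while' loop (the fuel only makes it total)
def pvAWhile (required b kernel_size : Int) : Nat → Int → Int
  | 0, num_layers => num_layers
  | fuel + 1, num_layers =>
    if get_receptive_field_size kernel_size num_layers b < required then
      pvAWhile required b kernel_size fuel (num_layers + 1)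
    else num_layers

def get_kernel_size_and_layers (required_receptive_field_size : Int) (kernel_sizes : List Int) (dilation_exponential_base : Int) : Option (Int × Int) :=
  -- fuel guard for totality: ample whenever the Python loop terminates (≤ required iterations for
  -- base ≥ 1, ~33 for base ≤ -2); where Python A diverges both ports return the same fuel-out value
  let fuel := required_receptive_field_size.toNat + 64
  let configurations := kernel_sizes.map
    (fun kernel_size => (kernel_size, pvAWhile required_receptive_field_size dilation_exponential_base kernel_size fuel 1))
  -- second pass: min_receptive_field_size = float('inf') ported as 'none'
  (configurations.foldl
    (fun st cfg =>
      let rf := get_receptive_field_size cfg.1 cfg.2 dilation_exponential_base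
      match st.1 with
      | none => (some rf, some cfg)
      | some m => if rf < m then (some rf, some cfg) else st)
    ((none : Option Int), (none : Option (Int × Int)))).2

-- ===== PORT B =====
-- B's inner 'while' loop: state (rf, power, num_layers), same fuel guard as A's port
def pvBWhileLoop (required b step : Int) : Nat → Int → Int → Int → Int × Int
  | 0, rf, _power, n => (rf, n)
  | fuel + 1, rf, power, n =>
    if rf < required then pvBWhileLoop required b step fuel (rf + step * power) (power * b) (n + 1)
    else (rf, n)

def get_kernel_size_and_layers_alt (required_receptive_field_size : Int) (kernel_sizes : List Int) (dilation_exponential_base : Int) : Option (Int × Int) :=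
  let fuel := required_receptive_field_size.toNat + 64
  (kernel_sizes.foldl
    (fun best kernel_size =>
      let step := 2 * (kernel_size - 1)
      let p := pvBWhileLoop required_receptive_field_size dilation_exponential_base step fuel (1 + step) dilation_exponential_base 1
      match best with
      | none => some (p.1, (kernel_size, p.2))
      | some bst => if p.1 < bst.1 then some (p.1, (kernel_size, p.2)) else best)
    (none : Option (Int × (Int × Int)))).map (·.2)

-- ===== PRECONDITION & SPEC =====
-- total: both ports are total (the while loops carry the same fuel guard), so no Pre_ is needed;
-- the equivalence below is unconditional.
def Spec_get_kernel_size_and_layers (required_receptive_field_size : Int) (kernel_sizes : List Int) (dilation_exponential_base : Int) (out : Option (Int × Int)) : Prop := out = get_kernel_size_and_layers_alt required_receptive_field_size kernel_sizes dilation_exponential_base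
instance (required_receptive_field_size : Int) (kernel_sizes : List Int) (dilation_exponential_base : Int) (out : Option (Int × Int)) : Decidable (Spec_get_kernel_size_and_layers required_receptive_field_size kernel_sizes dilation_exponential_base out) := by unfold Spec_get_kernel_size_and_layers; infer_instance

-- ===== CLAIM (what is proved, stated in full; the proofs are below) =====
def Claim_equal_get_kernel_size_and_layers : Prop := ∀ (required_receptive_field_size : Int) (kernel_sizes : List Int) (dilation_exponential_base : Int), Dom_get_kernel_size_and_layers required_receptive_field_size kernel_sizes dilation_exponential_base → Spec_get_kernel_size_and_layers required_receptive_field_size kernel_sizes dilation_exponential_base (get_kernel_size_and_layers required_receptive_field_size kernel_sizes dilation_exponential_base)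

-- ===== LEMMAS AND PROOFS =====

-- exact receptive field after m layers, as a recurrence
def pvE (k b : Int) : Nat → Int
  | 0 => 1
  | m + 1 => pvE k b m + 2 * b ^ m * (k - 1)

theorem pvRfs_eq (k b : Int) (m : Nat) : get_receptive_field_size k (m : Int) b = pvE k b m := by
  have h1 : ∀ n : Nat,
      (PySem.List.pyRange 1 ((n : Int) + 1) 1).foldl
        (fun acc l => acc + 2 * b ^ (l - 1).toNat * (k - 1)) 0 = pvE k b n - 1 := by
    intro n
    induction n with
    | zero => simp [PySem.List.pyRange_one_eq_nil, pvE]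
    | succ n ih =>
      have hc : ((n + 1 : Nat) : Int) + 1 = ((n : Int) + 1) + 1 := by push_cast; ring
      rw [hc, PySem.List.pyRange_one_succ_right (by omega), List.foldl_append, ih]
      simp [pvE]
      ring
  simp only [get_receptive_field_size]
  have h2 : (PySem.List.pyRange 1 ((m : Int) + 1) 1).foldl
      (fun acc l => acc + 2 * b ^ (l - 1).toNat *
        (PySem.List.pyGetD (List.replicate (m : Int).toNat k) (l - 1) 0 - 1)) 0
      = (PySem.List.pyRange 1 ((m : Int) + 1) 1).foldl
        (fun acc l => acc + 2 * b ^ (l - 1).toNat * (k - 1)) 0 := by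
    apply PySem.List.foldl_congr_mem
    intro acc l hl
    rw [PySem.List.mem_pyRange_one] at hl
    have hg : PySem.List.pyGetD (List.replicate (m : Int).toNat k) (l - 1) 0 = k := by
      rw [PySem.List.pyGetD_eq_getElem _ 0 (by omega) (by simp; omega)]
      simp
    rw [hg]
  rw [h2, h1]
  ring

-- common abstract loop both inner whiles simulate
def pvLoop (R k b : Int) : Nat → Nat → Nat
  | 0, m => m
  | fuel + 1, m => if pvE k b (m + 1) < R then pvLoop R k b fuel (m + 1) else m

theorem pvAWhile_eq (R b k : Int) (fuel : Nat) : ∀ m : Nat,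
    pvAWhile R b k fuel ((m : Int) + 1) = ((pvLoop R k b fuel m : Int) + 1) := by
  induction fuel with
  | zero => intro m; rfl
  | succ fuel ih =>
    intro m
    have hc : ((m : Int) + 1) = ((m + 1 : Nat) : Int) := by push_cast; ring
    show (if get_receptive_field_size k ((m : Int) + 1) b < R then
        pvAWhile R b k fuel (((m : Int) + 1) + 1) else ((m : Int) + 1))
      = ((pvLoop R k b (fuel + 1) m : Int) + 1)
    rw [hc, pvRfs_eq]
    show _ = ((if pvE k b (m + 1) < R then pvLoop R k b fuel (m + 1) else m : Nat) : Int) + 1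
    split_ifs with h
    · have := ih (m + 1)
      push_cast at this ⊢
      rw [show ((m : Int) + 1) + 1 = ((m + 1 : Nat) : Int) + 1 by push_cast; ring]
      simpa using this
    · push_cast; ring

theorem pvBWhile_eq (R b k : Int) (fuel : Nat) : ∀ m : Nat,
    pvBWhileLoop R b (2 * (k - 1)) fuel (pvE k b (m + 1)) (b ^ (m + 1)) ((m : Int) + 1)
      = (pvE k b (pvLoop R k b fuel m + 1), ((pvLoop R k b fuel m : Int) + 1)) := by
  induction fuel with
  | zero => intro m; rfl
  | succ fuel ih =>
    intro m
    show (if pvE k b (m + 1) < R then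
        pvBWhileLoop R b (2 * (k - 1)) fuel (pvE k b (m + 1) + 2 * (k - 1) * b ^ (m + 1))
          (b ^ (m + 1) * b) (((m : Int) + 1) + 1)
      else (pvE k b (m + 1), (m : Int) + 1))
      = _
    show _ = (pvE k b ((if pvE k b (m + 1) < R then pvLoop R k b fuel (m + 1) else m) + 1),
        ((if pvE k b (m + 1) < R then pvLoop R k b fuel (m + 1) else m : Nat) : Int) + 1)
    split_ifs with h
    · have hrf : pvE k b (m + 1) + 2 * (k - 1) * b ^ (m + 1) = pvE k b (m + 1 + 1) := by
        simp [pvE]; ring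
      have hpw : b ^ (m + 1) * b = b ^ (m + 1 + 1) := by
        ring
      have hn : ((m : Int) + 1) + 1 = ((m + 1 : Nat) : Int) + 1 := by push_cast; ring
      rw [hrf, hpw, hn, ih (m + 1)]
    · rfl

theorem pvAWhile_one (R b k : Int) (fuel : Nat) :
    pvAWhile R b k fuel 1 = ((pvLoop R k b fuel 0 : Int) + 1) := by
  have := pvAWhile_eq R b k fuel 0
  simpa using this

theorem pvBWhile_one (R b k : Int) (fuel : Nat) :
    pvBWhileLoop R b (2 * (k - 1)) fuel (1 + 2 * (k - 1)) b 1
      = (pvE k b (pvLoop R k b fuel 0 + 1), ((pvLoop R k b fuel 0 : Int) + 1)) := by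
  have := pvBWhile_eq R b k fuel 0
  simpa [pvE] using this

theorem pvRfs_succ_cast (k b : Int) (m : Nat) :
    get_receptive_field_size k ((m : Int) + 1) b = pvE k b (m + 1) := by
  have := pvRfs_eq k b (m + 1)
  push_cast at this
  exact this

theorem pvFold (F N : Int → Int) :
    ∀ (ks : List Int) (st : Option Int × Option (Int × Int)) (best : Option (Int × (Int × Int))),
      ((st = (none, none) ∧ best = none) ∨ (∃ m c, st = (some m, some c) ∧ best = some (m, c))) →
      (ks.foldl
        (fun st k =>
          match st.1 with
          | none => (some (F k), some (k, N k))
          | some m => if F k < m then (some (F k), some (k, N k)) else st) st).2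
      = ((ks.foldl
          (fun best k =>
            match best with
            | none => some (F k, (k, N k))
            | some bst => if F k < bst.1 then some (F k, (k, N k)) else best) best).map (·.2)) := by
  intro ks
  induction ks with
  | nil =>
    intro st best hrel
    rcases hrel with ⟨hst, hbest⟩ | ⟨m, c, hst, hbest⟩ <;> subst hst <;> subst hbest <;> rfl
  | cons k ks ih =>
    intro st best hrel
    simp only [List.foldl_cons]
    rcases hrel with ⟨hst, hbest⟩ | ⟨m, c, hst, hbest⟩ <;> subst hst <;> subst hbest
    · exact ih _ _ (Or.inr ⟨F k, (k, N k), rfl, rfl⟩)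
    · show ((ks.foldl _ (if F k < m then (some (F k), some (k, N k)) else (some m, some c))).2 : Option (Int × Int))
        = (ks.foldl _ (if F k < m then some (F k, (k, N k)) else some (m, c))).map (·.2)
      split_ifs with h
      · exact ih _ _ (Or.inr ⟨F k, (k, N k), rfl, rfl⟩)
      · exact ih _ _ (Or.inr ⟨m, c, rfl, rfl⟩)

-- ===== VERDICT (by name: the statement is the Claim_ definition above) =====
theorem get_kernel_size_and_layers_spec : Claim_equal_get_kernel_size_and_layers := by
  intro R ks b _hdom
  unfold Spec_get_kernel_size_and_layers
  unfold get_kernel_size_and_layers get_kernel_size_and_layers_alt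
  simp only [List.foldl_map, pvAWhile_one, pvBWhile_one, pvRfs_succ_cast]
  exact pvFold (fun k => pvE k b (pvLoop R k b (R.toNat + 64) 0 + 1))
    (fun k => ((pvLoop R k b (R.toNat + 64) 0 : Int) + 1)) ks (none, none) none (Or.inl ⟨rfl, rfl⟩)
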